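-- pv_equiv track=rewrite | github.com/kazRayKaito/raysPackage | rayspackage/database/_funcs.py | flattenDataT
-- ===== SOURCE A (Python) =====
-- def transpose(data):
--     transposedData = []
--     for i in range(len(data[0])):
--         newrow = []
--         for row in data:
--             newrow.append(row[i])
--         transposedData.append(newrow)
--     return transposedData
--
-- def flattenDataT(data):
--     data = transpose(data)
--     flattenData = []
--     flattenHead = []
--     rowHeaderList = data[0][1:]
--     for row in data[1:]:
--         columnHead = row[0]
--         for column, rowHeader in zip(row[1:], rowHeaderList):
--             flattenHead.append(f"[{rowHeader}] [{columnHead}]")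
--             flattenData.append(column)
--     return [flattenHead, flattenData]
-- ===== SOURCE B (Python) =====
-- def flattenDataT(data):
--     flattenHead = []
--     flattenData = []
--     cols = data[0]
--     for j in range(1, len(cols)):
--         columnHead = cols[j]
--         for row in data[1:]:
--             flattenHead.append(f"[{row[0]}] [{columnHead}]")
--             flattenData.append(row[j])
--     return [flattenHead, flattenData]
-- ===== Notes on version B (the rewrite author's own statement) =====
-- stated objective: simpler
-- what changed: B drops the transpose step and its intermediate matrix entirely, indexing the original table directly with an outer loop over columns and an inner loop over rows.
import Mathlib
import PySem

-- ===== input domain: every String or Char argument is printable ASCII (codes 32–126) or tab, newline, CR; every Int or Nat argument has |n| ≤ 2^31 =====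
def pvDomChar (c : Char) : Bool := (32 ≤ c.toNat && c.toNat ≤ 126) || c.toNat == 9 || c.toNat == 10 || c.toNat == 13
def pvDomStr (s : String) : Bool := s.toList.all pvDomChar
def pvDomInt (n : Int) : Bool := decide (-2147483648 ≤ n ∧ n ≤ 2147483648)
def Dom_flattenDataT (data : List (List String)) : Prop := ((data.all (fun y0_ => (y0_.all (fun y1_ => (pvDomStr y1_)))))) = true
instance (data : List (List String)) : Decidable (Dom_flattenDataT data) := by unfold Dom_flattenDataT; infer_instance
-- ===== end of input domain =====

-- B drops the transpose step and its intermediate matrix, indexing the original table directly (objective: simpler).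

-- l[i] for a nonnegative in-range index i (Pre_ guarantees in-range; out of range Python raises, excluded by Pre_)
def getS (l : List String) (i : Nat) : String := l.getD i ""
def getR (l : List (List String)) (i : Nat) : List String := l.getD i []

-- ===== PORT A =====
-- transpose(data): for i in range(len(data[0])): newrow = [row[i] for row in data] (written as the appends A performs)
def transposeA (data : List (List String)) : List (List String) :=
  (List.range (getR data 0).length).foldl
    (fun acc i => acc ++ [data.foldl (fun nr row => nr ++ [getS row i]) []]) []

def flattenDataT (data : List (List String)) : List (List String) :=
  let t := transposeA data
  let rowHeaderList := (getR t 0).drop 1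
  let res := (t.drop 1).foldl
    (fun (acc : List String × List String) row =>
      let columnHead := getS row 0
      ((row.drop 1).zip rowHeaderList).foldl
        (fun (acc2 : List String × List String) p =>
          (acc2.1 ++ ["[" ++ p.2 ++ "] [" ++ columnHead ++ "]"], acc2.2 ++ [p.1])) acc)
    ([], [])
  [res.1, res.2]

-- ===== PORT B =====
-- range(1, len(cols)) is ported as (List.range cols.length).drop 1 = [1, …, len-1]
def flattenDataT_alt (data : List (List String)) : List (List String) :=
  let cols := getR data 0
  let res := ((List.range cols.length).drop 1).foldl
    (fun (acc : List String × List String) j =>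
      let columnHead := getS cols j
      (data.drop 1).foldl
        (fun (acc2 : List String × List String) row =>
          (acc2.1 ++ ["[" ++ getS row 0 ++ "] [" ++ columnHead ++ "]"], acc2.2 ++ [getS row j])) acc)
    ([], [])
  [res.1, res.2]

-- ===== PRECONDITION & SPEC =====
-- Pre_ excludes exactly the inputs on which Python A raises IndexError: empty data, an empty first
-- row (the transposed table is then empty and data[0] raises), or a row shorter than the first row
-- (transpose's row[i] raises).
def Pre_flattenDataT (data : List (List String)) : Prop :=
  data ≠ [] ∧ getR data 0 ≠ [] ∧ ∀ row ∈ data, (getR data 0).length ≤ row.length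
instance (data : List (List String)) : Decidable (Pre_flattenDataT data) := by
  unfold Pre_flattenDataT; infer_instance
def pvWitness_flattenDataT : List (List String) := [["h", "c1", "c2"], ["r1", "a", "b"], ["r2", "c", "d"]]

def Spec_flattenDataT (data : List (List String)) (out : List (List String)) : Prop := out = flattenDataT_alt data
instance (data : List (List String)) (out : List (List String)) : Decidable (Spec_flattenDataT data out) := by unfold Spec_flattenDataT; infer_instance

-- ===== CLAIM (what is proved, stated in full; the proofs are below) =====
def Claim_equal_flattenDataT : Prop := ∀ (data : List (List String)), Dom_flattenDataT data → Pre_flattenDataT data → Spec_flattenDataT data (flattenDataT data)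

-- ===== LEMMAS AND PROOFS =====

theorem foldl_app {α β : Type} (f : α → β) :
    ∀ (l : List α) (init : List β),
      l.foldl (fun acc x => acc ++ [f x]) init = init ++ l.map f := by
  intro l
  induction l with
  | nil => intro init; simp
  | cons a l ih => intro init; simp [List.foldl, ih]

theorem transposeA_eq (data : List (List String)) :
    transposeA data
      = (List.range (getR data 0).length).map (fun i => data.map (fun r => getS r i)) := by
  simp only [transposeA, foldl_app, List.nil_append]

theorem flattenDataT_eq_alt (data : List (List String)) :
    flattenDataT data = flattenDataT_alt data := by
  cases data with
  | nil => rfl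
  | cons r0 rest =>
    cases r0 with
    | nil => simp [flattenDataT, flattenDataT_alt, transposeA, getR, getS]
    | cons c0 cs =>
      -- k = len(data[0]) = cs.length + 1 ≥ 1
      rw [flattenDataT, flattenDataT_alt, transposeA_eq]
      show _ = _
      rw [show getR ((c0 :: cs) :: rest) 0 = c0 :: cs from rfl]
      simp only [List.length_cons, List.range_succ_eq_map, List.map_cons, List.map_map]
      -- head of transposed table is column 0; its tail is the row headers
      simp only [getR, List.getD_cons_zero, List.drop_succ_cons,
        List.drop_zero, List.foldl_map]
      -- both outer folds now run over List.range cs.length with pointwise-equal bodies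
      simp only [Function.comp, List.drop_succ_cons, List.drop_zero,
        List.zip_map', List.foldl_map, getS, List.getD_cons_zero]

-- ===== VERDICT (by name: the statement is the Claim_ definition above) =====
theorem flattenDataT_spec : Claim_equal_flattenDataT := by
  intro data _ _
  unfold Spec_flattenDataT
  exact flattenDataT_eq_alt data
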